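-- pv_equiv track=rewrite | github.com/Maulbeere01/Roundhold | BACKUPVONROUNDHOLD_12.11_2120/client/src/td_client/map/map_data.py | generate_terrain_map
-- ===== SOURCE A (Python) =====
-- from typing import Dict, List, Tuple
--
-- def _get_border_tile_key( row: int, col: int, height: int, width: int) -> str:
--     """Determine tile position key based on row and column.
--
--         Categorizes each tile position in a rectangular map into one of 9 possible
--         border tile types based on its position relative to the map boundaries.
--         This enables automatic placement of appropriate border tiles (corners, edges,
--         center) when generating terrain maps.
--
--         The function uses a 3x3 grid pattern:
--         - Corners: top_left, top_right, bottom_left, bottom_right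
--         - Edges: top_mid, bottom_mid, mid_left, mid_right
--         - Center: mid_mid
--     Args:
--         row: Row index
--         col: Column index
--         height: Total map height
--         width: Total map width
--
--     Returns:
--         Tile position key (e.g., 'top_left', 'mid_mid')
--
--     The returned key is then used to look up the corresponding tile ID
--     from LEFT_TILES or RIGHT_TILES dictionaries.
--     """
--     is_top = row == 0
--     is_bottom = row == height - 1
--     is_left = col == 0
--     is_right = col == width - 1
--
--     if is_top:
--         return 'top_left' if is_left else (
--             'top_right' if is_right else 'top_mid'
--         )
--     elif is_bottom:
--         return 'bottom_left' if is_left else (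
--             'bottom_right' if is_right else 'bottom_mid'
--         )
--     else:
--         return 'mid_left' if is_left else (
--             'mid_right' if is_right else 'mid_mid'
--         )
--
-- def generate_terrain_map(
--     width: int,
--     height: int,
--     tile_ids: Dict[str, int]
-- ) -> List[List[int]]:
--     """Generate a map with border tiles.
--
--     Creates a rectangular map with specific tiles for borders
--     (corners, edges) and center areas, using a 3x3 tile pattern.
--
--     Args:
--         width: Number of tiles horizontally
--         height: Number of tiles vertically
--         tile_ids: Dict mapping position names to tile IDs
--
--     Returns:
--         2D list of tile IDs
--     """
--     return [
--         [
--             tile_ids[_get_border_tile_key(row, col, height, width)]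
--             for col in range(width)
--         ]
--         for row in range(height)
--     ]
-- ===== SOURCE B (Python) =====
-- def generate_terrain_map(width, height, tile_ids):
--     if height <= 0:
--         return []
--     row_cats = ['top' if r == 0 else ('bottom' if r == height - 1 else 'mid')
--                 for r in range(height)]
--     col_cats = ['left' if c == 0 else ('right' if c == width - 1 else 'mid')
--                 for c in range(width)]
--     return [[tile_ids[rc + '_' + cc] for cc in col_cats] for rc in row_cats]
-- ===== Notes on version B (the rewrite author's own statement) =====
-- stated objective: simpler
-- what changed: Replaces the per-cell nested 9-way border classifier with two independent axis classifications (row categories and column categories precomputed once) combined by string concatenation of the key.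
import Mathlib
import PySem

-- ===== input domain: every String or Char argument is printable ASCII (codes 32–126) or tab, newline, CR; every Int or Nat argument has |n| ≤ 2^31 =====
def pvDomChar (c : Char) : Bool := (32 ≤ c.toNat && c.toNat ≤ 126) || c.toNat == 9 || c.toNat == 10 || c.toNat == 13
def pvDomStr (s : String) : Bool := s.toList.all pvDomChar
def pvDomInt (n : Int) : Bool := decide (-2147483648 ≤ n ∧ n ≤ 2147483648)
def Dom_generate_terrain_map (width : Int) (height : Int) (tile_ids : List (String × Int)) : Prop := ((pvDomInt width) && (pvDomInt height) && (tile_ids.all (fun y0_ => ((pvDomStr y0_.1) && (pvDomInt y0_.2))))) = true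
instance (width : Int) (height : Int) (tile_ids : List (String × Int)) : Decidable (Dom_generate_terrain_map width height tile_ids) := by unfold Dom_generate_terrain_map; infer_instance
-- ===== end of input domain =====

-- B classifies rows and columns independently and concatenates the key, instead of A's
-- per-cell nested 9-way classifier (objective: simpler decomposition; same cost).


-- ===== PORT A =====
-- helper _get_border_tile_key, transliterated branch for branch
def pvBorderTileKey (row : Int) (col : Int) (height : Int) (width : Int) : String :=
  let is_top := row = 0
  let is_bottom := row = height - 1
  let is_left := col = 0
  let is_right := col = width - 1
  if is_top then
    (if is_left then "top_left" else if is_right then "top_right" else "top_mid")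
  else if is_bottom then
    (if is_left then "bottom_left" else if is_right then "bottom_right" else "bottom_mid")
  else
    (if is_left then "mid_left" else if is_right then "mid_right" else "mid_mid")

def generate_terrain_map (width : Int) (height : Int) (tile_ids : List (String × Int)) : List (List Int) :=
  let d := PySem.Dict.ofList tile_ids
  (PySem.List.pyRange 0 height 1).map (fun row =>
    (PySem.List.pyRange 0 width 1).map (fun col =>
      PySem.Dict.getD d (pvBorderTileKey row col height width) 0))

-- ===== PORT B =====
def generate_terrain_map_alt (width : Int) (height : Int) (tile_ids : List (String × Int)) : List (List Int) :=
  if height ≤ 0 then [] else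
  let row_cats := (PySem.List.pyRange 0 height 1).map (fun r =>
    if r = 0 then "top" else if r = height - 1 then "bottom" else "mid")
  let col_cats := (PySem.List.pyRange 0 width 1).map (fun c =>
    if c = 0 then "left" else if c = width - 1 then "right" else "mid")
  let d := PySem.Dict.ofList tile_ids
  row_cats.map (fun rc => col_cats.map (fun cc => PySem.Dict.getD d (rc ++ "_" ++ cc) 0))

-- ===== PRECONDITION & SPEC =====
-- helpers for Pre_: the row/column categories that actually occur for the given sizes
def pvNeededRowCats (height : Int) : List String :=
  (if 0 < height then ["top"] else []) ++ (if 1 < height then ["bottom"] else []) ++ (if 2 < height then ["mid"] else [])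
def pvNeededColCats (width : Int) : List String :=
  (if 0 < width then ["left"] else []) ++ (if 1 < width then ["right"] else []) ++ (if 2 < width then ["mid"] else [])

-- Pre_ excludes exactly the inputs where Python A raises KeyError: every border key the grid
-- actually uses must be present in tile_ids.
def Pre_generate_terrain_map (width : Int) (height : Int) (tile_ids : List (String × Int)) : Prop :=
  ∀ rc ∈ pvNeededRowCats height, ∀ cc ∈ pvNeededColCats width,
    ((PySem.Dict.ofList tile_ids).get? (rc ++ "_" ++ cc)).isSome = true
instance (width : Int) (height : Int) (tile_ids : List (String × Int)) : Decidable (Pre_generate_terrain_map width height tile_ids) := by unfold Pre_generate_terrain_map; infer_instance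

def pvWitness_generate_terrain_map : Int × Int × (List (String × Int)) := (1, 1, [("top_left", 5)])

def Spec_generate_terrain_map (width : Int) (height : Int) (tile_ids : List (String × Int)) (out : List (List Int)) : Prop := out = generate_terrain_map_alt width height tile_ids
instance (width : Int) (height : Int) (tile_ids : List (String × Int)) (out : List (List Int)) : Decidable (Spec_generate_terrain_map width height tile_ids out) := by unfold Spec_generate_terrain_map; infer_instance

-- ===== CLAIM (what is proved, stated in full; the proofs are below) =====
def Claim_equal_generate_terrain_map : Prop := ∀ (width : Int) (height : Int) (tile_ids : List (String × Int)), Dom_generate_terrain_map width height tile_ids → Pre_generate_terrain_map width height tile_ids → Spec_generate_terrain_map width height tile_ids (generate_terrain_map width height tile_ids)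

-- ===== LEMMAS AND PROOFS =====

-- A's 9-way key equals the concatenation of B's two axis categories, for every cell.
theorem pvKey_eq (row col height width : Int) :
    pvBorderTileKey row col height width =
      (if row = 0 then "top" else if row = height - 1 then "bottom" else "mid") ++ "_" ++
      (if col = 0 then "left" else if col = width - 1 then "right" else "mid") := by
  simp only [pvBorderTileKey]
  split_ifs <;> rfl

-- ===== VERDICT (by name: the statement is the Claim_ definition above) =====
theorem generate_terrain_map_spec : Claim_equal_generate_terrain_map := by
  intro width height tile_ids _ _
  unfold Spec_generate_terrain_map generate_terrain_map generate_terrain_map_alt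
  by_cases hh : height ≤ 0
  · simp [hh, PySem.List.pyRange_one_eq_nil hh]
  · simp only [hh, if_false]
    simp only [List.map_map, Function.comp_def]
    refine List.map_congr_left (fun row _ => ?_)
    refine List.map_congr_left (fun col _ => ?_)
    rw [pvKey_eq]
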